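-- pv_equiv track=rewrite | github.com/cheolypark/SysMPy | sysmpy/util.py | or_selector
-- ===== SOURCE A (Python) =====
-- def or_selector(elements):
--     cur_index = 0
--     cur_element = None
--     el_list = or_selector_tree(elements, cur_index, cur_element)
--
--     del el_list[-1]
--
--     for el in el_list:
--         del el[-1]
--
--     return el_list
--
-- def or_selector_tree(elements, cur_index, cur_element):
--     if len(elements) == cur_index:
--         return_list = []
--         el_list = []
--         return_list.append(el_list)
--         el_list.append(cur_element)
--         return return_list
--
--     el_list1 = or_selector_tree(elements, cur_index + 1, elements[cur_index])
--     el_list2 = or_selector_tree(elements, cur_index + 1, None)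
--
--     cur = cur_element
--
--     return_list = []
--     for el in el_list1:
--         el.append(cur)
--         return_list.append(el)
--     for el in el_list2:
--         el.append(cur)
--         return_list.append(el)
--
--     return return_list
-- ===== SOURCE B (Python) =====
-- from itertools import product
--
-- def or_selector(elements):
--     result = [list(combo)[::-1] for combo in product(*((e, None) for e in elements))]
--     del result[-1]
--     return result
-- ===== Notes on version B (the rewrite author's own statement) =====
-- stated objective: idiomatic
-- what changed: Replaced the hand-written recursive tree builder with per-suffix list surgery (del of sentinel entries) by a single itertools.product over the (e, None) pairs, reversing each tuple and dropping the trailing all-None row.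
import Mathlib
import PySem

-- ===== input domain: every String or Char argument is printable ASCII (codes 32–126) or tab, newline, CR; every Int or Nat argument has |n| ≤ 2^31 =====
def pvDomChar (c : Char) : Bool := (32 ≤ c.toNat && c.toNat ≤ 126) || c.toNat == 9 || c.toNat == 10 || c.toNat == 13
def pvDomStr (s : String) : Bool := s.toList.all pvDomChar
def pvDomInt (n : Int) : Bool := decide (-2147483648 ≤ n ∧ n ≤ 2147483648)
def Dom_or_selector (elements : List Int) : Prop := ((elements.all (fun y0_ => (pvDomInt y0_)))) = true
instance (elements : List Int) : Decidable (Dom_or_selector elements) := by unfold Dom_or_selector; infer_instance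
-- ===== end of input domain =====

-- B builds the rows with itertools.product over (e, None) pairs instead of A's recursive tree; same cost, more idiomatic.

-- ===== PORT A =====
-- or_selector_tree(elements, cur_index, cur_element); Python compares len(elements) == cur_index,
-- written here as ≤ only to make the recursion total (every reachable call has cur_index ≤ len, where the two tests agree).
def or_selector_tree (elements : List Int) (cur_index : Nat) (cur_element : Option Int) :
    List (List (Option Int)) :=
  if elements.length ≤ cur_index then
    [[cur_element]]
  else
    let el_list1 := or_selector_tree elements (cur_index + 1) (some (elements.getD cur_index 0))
    let el_list2 := or_selector_tree elements (cur_index + 1) none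
    let cur := cur_element
    (el_list1.map (fun el => el ++ [cur])) ++ (el_list2.map (fun el => el ++ [cur]))
termination_by elements.length - cur_index

def or_selector (elements : List Int) : List (List (Option Int)) :=
  let el_list := or_selector_tree elements 0 none
  (el_list.dropLast).map (fun el => el.dropLast)

-- ===== PORT B =====
-- itertools.product(*((e, None) for e in elements)): first factor varies slowest
def pvProduct (elements : List Int) : List (List (Option Int)) :=
  match elements with
  | [] => [[]]
  | e :: rest => ([some e, none]).flatMap (fun x => (pvProduct rest).map (fun t => x :: t))

def or_selector_alt (elements : List Int) : List (List (Option Int)) :=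
  ((pvProduct elements).map (fun combo => combo.reverse)).dropLast

-- ===== PRECONDITION & SPEC =====
def Spec_or_selector (elements : List Int) (out : List (List (Option Int))) : Prop := out = or_selector_alt elements
instance (elements : List Int) (out : List (List (Option Int))) : Decidable (Spec_or_selector elements out) := by unfold Spec_or_selector; infer_instance

-- ===== CLAIM (what is proved, stated in full; the proofs are below) =====
def Claim_equal_or_selector : Prop := ∀ (elements : List Int), Dom_or_selector elements → Spec_or_selector elements (or_selector elements)

-- ===== LEMMAS AND PROOFS =====

-- A's tree at index i produces exactly the product rows of the suffix, reversed, with cur appended.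
theorem tree_eq_product (elements : List Int) :
    ∀ d i cur, elements.length - i = d →
      or_selector_tree elements i cur
        = (pvProduct (elements.drop i)).map (fun t => t.reverse ++ [cur]) := by
  intro d
  induction d with
  | zero =>
    intro i cur h
    have hle : elements.length ≤ i := by omega
    rw [or_selector_tree, if_pos hle, List.drop_eq_nil_of_le hle]
    simp [pvProduct]
  | succ n ih =>
    intro i cur h
    have hlt : i < elements.length := by omega
    have hne : ¬ elements.length ≤ i := by omega
    rw [or_selector_tree, if_neg hne]
    have h1 := ih (i + 1) (some (elements.getD i 0)) (by omega)
    have h2 := ih (i + 1) none (by omega)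
    have hdrop : elements.drop i = elements[i] :: elements.drop (i + 1) :=
      List.drop_eq_getElem_cons hlt
    have hgetD : elements.getD i 0 = elements[i] := by
      simp [List.getD, List.getElem?_eq_getElem hlt]
    rw [hgetD] at h1
    simp only [hgetD, h1, h2, hdrop, pvProduct, List.flatMap_cons, List.flatMap_nil,
      List.map_append, List.map_map, List.append_nil]
    congr 1 <;> (apply List.map_congr_left; intro t _; simp)

theorem or_selector_spec : Claim_equal_or_selector := by
  intro elements _
  unfold Spec_or_selector or_selector or_selector_alt
  rw [tree_eq_product elements (elements.length - 0) 0 none rfl]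
  simp only [List.drop_zero, ← List.map_dropLast, List.map_map]
  apply List.map_congr_left
  intro t _
  simp
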